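-- pv_equiv track=rewrite | github.com/yungkocherov/WB_feedback | src/marketplace_reviews/parsers/wildberries.py | _image_url
-- ===== SOURCE A (Python) =====
-- _BASKET_RANGES = [
--     (143, "01"), (287, "02"), (431, "03"), (719, "04"), (1007, "05"),
--     (1061, "06"), (1115, "07"), (1169, "08"), (1313, "09"), (1601, "10"),
--     (1655, "11"), (1919, "12"), (2045, "13"), (2189, "14"), (2405, "15"),
--     (2621, "16"), (2837, "17"), (3053, "18"), (3269, "19"), (3485, "20"),
--     (3701, "21"), (3917, "22"), (4133, "23"), (4349, "24"), (4565, "25"),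
-- ]
--
-- def _image_url(nm_id: int) -> str:
--     vol = nm_id // 100000
--     part = nm_id // 1000
--     basket = "25"
--     for max_vol, num in _BASKET_RANGES:
--         if vol <= max_vol:
--             basket = num
--             break
--     return f"https://basket-{basket}.wbbasket.ru/vol{vol}/part{part}/{nm_id}/images/c246x328/1.webp"
-- ===== SOURCE B (Python) =====
-- _THRESHOLDS = [143, 287, 431, 719, 1007, 1061, 1115, 1169, 1313, 1601,
--                1655, 1919, 2045, 2189, 2405, 2621, 2837, 3053, 3269, 3485,
--                3701, 3917, 4133, 4349, 4565]
-- _NUMS = ["01", "02", "03", "04", "05", "06", "07", "08", "09", "10",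
--          "11", "12", "13", "14", "15", "16", "17", "18", "19", "20",
--          "21", "22", "23", "24", "25"]
--
-- def _image_url(nm_id: int) -> str:
--     vol = nm_id // 100000
--     part = nm_id // 1000
--     # binary search: first index i with vol <= _THRESHOLDS[i]
--     lo, hi = 0, len(_THRESHOLDS)
--     while lo < hi:
--         mid = (lo + hi) // 2
--         if _THRESHOLDS[mid] < vol:
--             lo = mid + 1
--         else:
--             hi = mid
--     basket = _NUMS[lo] if lo < len(_NUMS) else "25"
--     return f"https://basket-{basket}.wbbasket.ru/vol{vol}/part{part}/{nm_id}/images/c246x328/1.webp"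
-- ===== Notes on version B (the rewrite author's own statement) =====
-- stated objective: alternative
-- what changed: Replaces the linear first-match scan over _BASKET_RANGES with a hand-written binary search (bisect_left semantics) over a sorted thresholds table plus a parallel prefix table, with '25' for the overflow index.
import Mathlib
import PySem

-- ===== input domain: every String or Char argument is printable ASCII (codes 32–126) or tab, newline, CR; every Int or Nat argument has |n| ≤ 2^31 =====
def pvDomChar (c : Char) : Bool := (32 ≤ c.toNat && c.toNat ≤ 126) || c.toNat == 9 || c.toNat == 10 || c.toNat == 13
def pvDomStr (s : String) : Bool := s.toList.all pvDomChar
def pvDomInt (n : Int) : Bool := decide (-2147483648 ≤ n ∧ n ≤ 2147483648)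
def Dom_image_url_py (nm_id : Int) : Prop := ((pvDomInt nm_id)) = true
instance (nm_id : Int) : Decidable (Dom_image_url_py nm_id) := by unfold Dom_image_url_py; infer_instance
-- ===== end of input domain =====

-- B replaces A's linear first-match scan over the basket table with a hand-written
-- binary search (bisect_left semantics) over the sorted threshold table; same result.


-- ===== PORT A =====
def pvBasketRanges : List (Int × String) :=
  [(143, "01"), (287, "02"), (431, "03"), (719, "04"), (1007, "05"),
   (1061, "06"), (1115, "07"), (1169, "08"), (1313, "09"), (1601, "10"),
   (1655, "11"), (1919, "12"), (2045, "13"), (2189, "14"), (2405, "15"),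
   (2621, "16"), (2837, "17"), (3053, "18"), (3269, "19"), (3485, "20"),
   (3701, "21"), (3917, "22"), (4133, "23"), (4349, "24"), (4565, "25")]
def pvFindBasket (vol : Int) : List (Int × String) → String
  | [] => "25"
  | (maxVol, num) :: rest => if vol ≤ maxVol then num else pvFindBasket vol rest

def image_url_py (nm_id : Int) : String :=
  let vol := PySem.Int.floordiv nm_id 100000
  let part := PySem.Int.floordiv nm_id 1000
  let basket := pvFindBasket vol pvBasketRanges
  "https://basket-" ++ basket ++ ".wbbasket.ru/vol" ++ PySem.Int.toStr vol ++
    "/part" ++ PySem.Int.toStr part ++ "/" ++ PySem.Int.toStr nm_id ++ "/images/c246x328/1.webp"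

-- ===== PORT B =====
def pvThresholds : List Int :=
  [143, 287, 431, 719, 1007, 1061, 1115, 1169, 1313, 1601,
   1655, 1919, 2045, 2189, 2405, 2621, 2837, 3053, 3269, 3485,
   3701, 3917, 4133, 4349, 4565]
def pvNums : List String :=
  ["01", "02", "03", "04", "05", "06", "07", "08", "09", "10",
   "11", "12", "13", "14", "15", "16", "17", "18", "19", "20",
   "21", "22", "23", "24", "25"]
def pvBsearch (vol : Int) (lo hi : Nat) : Nat :=
  if _h : lo < hi then
    let mid := (lo + hi) / 2
    if pvThresholds.getD mid 0 < vol then pvBsearch vol (mid + 1) hi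
    else pvBsearch vol lo mid
  else lo
termination_by hi - lo
decreasing_by all_goals omega


def image_url_py_alt (nm_id : Int) : String :=
  let vol := PySem.Int.floordiv nm_id 100000
  let part := PySem.Int.floordiv nm_id 1000
  let lo := pvBsearch vol 0 pvThresholds.length
  let basket := if lo < pvNums.length then pvNums.getD lo "" else "25"
  "https://basket-" ++ basket ++ ".wbbasket.ru/vol" ++ PySem.Int.toStr vol ++
    "/part" ++ PySem.Int.toStr part ++ "/" ++ PySem.Int.toStr nm_id ++ "/images/c246x328/1.webp"

-- ===== PRECONDITION & SPEC =====
def Spec_image_url_py (nm_id : Int) (out : String) : Prop := out = image_url_py_alt nm_id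
instance (nm_id : Int) (out : String) : Decidable (Spec_image_url_py nm_id out) := by unfold Spec_image_url_py; infer_instance

-- ===== CLAIM (what is proved, stated in full; the proofs are below) =====
def Claim_equal_image_url_py : Prop := ∀ (nm_id : Int), Dom_image_url_py nm_id → Spec_image_url_py nm_id (image_url_py nm_id)

-- ===== LEMMAS AND PROOFS =====
lemma pvThresholds_mono : ∀ i < 25, ∀ j < 25, i ≤ j →
    pvThresholds.getD i 0 ≤ pvThresholds.getD j 0 := by decide

lemma pvRanges_fst : ∀ i < 25,
    (pvBasketRanges.getD i (0, "")).1 = pvThresholds.getD i 0 := by decide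

lemma pvRanges_snd : ∀ i < 25,
    (pvBasketRanges.getD i (0, "")).2 = pvNums.getD i "" := by decide

lemma pvBsearch_inv (vol : Int) : ∀ (d lo hi : Nat), hi - lo ≤ d → lo ≤ hi → hi ≤ 25 →
    (∀ i, i < lo → pvThresholds.getD i 0 < vol) →
    (∀ i, hi ≤ i → i < 25 → ¬ pvThresholds.getD i 0 < vol) →
    ((∀ i, i < pvBsearch vol lo hi → pvThresholds.getD i 0 < vol) ∧
     (∀ i, pvBsearch vol lo hi ≤ i → i < 25 → ¬ pvThresholds.getD i 0 < vol) ∧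
     pvBsearch vol lo hi ≤ 25) := by
  intro d
  induction d with
  | zero =>
    intro lo hi hd hlh h25 h1 h2
    rw [pvBsearch]
    rw [dif_neg (by omega : ¬ lo < hi)]
    exact ⟨h1, fun i hli hi25 => h2 i (by omega) hi25, by omega⟩
  | succ d ih =>
    intro lo hi hd hlh h25 h1 h2
    rw [pvBsearch]
    by_cases hlt : lo < hi
    · rw [dif_pos hlt]
      by_cases hc : pvThresholds.getD ((lo + hi) / 2) 0 < vol
      · simp only [hc, if_true]
        refine ih ((lo + hi) / 2 + 1) hi (by omega) (by omega) h25 ?_ h2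
        intro i hi1
        by_cases hilo : i < lo
        · exact h1 i hilo
        · exact lt_of_le_of_lt
            (pvThresholds_mono i (by omega) ((lo + hi) / 2) (by omega) (by omega)) hc
      · simp only [hc, if_false]
        refine ih lo ((lo + hi) / 2) (by omega) (by omega) (by omega) h1 ?_
        intro i hmi hi25
        by_cases hih : hi ≤ i
        · exact h2 i hih hi25
        · intro hlt'
          exact hc (lt_of_le_of_lt
            (pvThresholds_mono ((lo + hi) / 2) (by omega) i hi25 hmi) hlt')
    · rw [dif_neg hlt]
      exact ⟨h1, fun i hli hi25 => h2 i (by omega) hi25, by omega⟩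

lemma pvFind_eq (vol : Int) : ∀ (ps : List (Int × String)) (r : Nat),
    (∀ i, i < r → i < ps.length → (ps.getD i (0, "")).1 < vol) →
    (∀ i, r ≤ i → i < ps.length → ¬ (ps.getD i (0, "")).1 < vol) →
    pvFindBasket vol ps = if r < ps.length then (ps.getD r (0, "")).2 else "25" := by
  intro ps
  induction ps with
  | nil => intro r _ _; simp [pvFindBasket]
  | cons p rest ih =>
    intro r h1 h2
    obtain ⟨t, s⟩ := p
    simp only [pvFindBasket]
    by_cases hc : vol ≤ t
    · rw [if_pos hc]
      have hr0 : r = 0 := by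
        by_contra hne
        exact absurd (h1 0 (by omega) (by simp)) (by simpa using hc)
      subst hr0
      simp
    · rw [if_neg hc]
      have hr1 : 1 ≤ r := by
        by_contra hne
        exact (h2 0 (by omega) (by simp)) (by simpa using not_le.mp hc)
      rw [ih (r - 1)
        (fun i hi hil => by
          have := h1 (i + 1) (by omega) (by simpa using Nat.succ_lt_succ hil)
          simpa using this)
        (fun i hi hil => by
          have := h2 (i + 1) (by omega) (by simpa using Nat.succ_lt_succ hil)
          simpa using this)]
      have : r - 1 < rest.length ↔ r < (⟨t, s⟩ :: rest : List (Int × String)).length := by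
        simp; omega
      by_cases hrl : r - 1 < rest.length
      · rw [if_pos hrl, if_pos (this.mp hrl)]
        have : r = (r - 1) + 1 := by omega
        rw [this]
        simp
      · rw [if_neg hrl, if_neg (fun h => hrl (this.mpr h))]

lemma pvBasket_eq (vol : Int) :
    pvFindBasket vol pvBasketRanges =
      (if pvBsearch vol 0 pvThresholds.length < pvNums.length
       then pvNums.getD (pvBsearch vol 0 pvThresholds.length) "" else "25") := by
  obtain ⟨hA, hB, hr⟩ := pvBsearch_inv vol 25 0 25 (by omega) (by omega) (by omega)
    (fun i hi => absurd hi (by omega))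
    (fun i h1 h2 => absurd (lt_of_le_of_lt h1 h2) (lt_irrefl 25))
  have hlen : pvThresholds.length = 25 := rfl
  have hnlen : pvNums.length = 25 := rfl
  have hplen : pvBasketRanges.length = 25 := rfl
  rw [hlen, hnlen]
  rw [pvFind_eq vol pvBasketRanges (pvBsearch vol 0 25)
    (fun i hi hil => by rw [pvRanges_fst i (by omega)]; exact hA i hi)
    (fun i hi hil => by rw [pvRanges_fst i (by omega)]; exact hB i hi (by omega))]
  rw [hplen]
  by_cases h : pvBsearch vol 0 25 < 25
  · rw [if_pos h, if_pos h, pvRanges_snd _ h]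
  · rw [if_neg h, if_neg h]

-- ===== VERDICT (by name: the statement is the Claim_ definition above) =====
theorem image_url_py_spec : Claim_equal_image_url_py := by
  intro nm_id _
  unfold Spec_image_url_py image_url_py image_url_py_alt
  simp only [pvBasket_eq]
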